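-- pv_equiv track=rewrite | github.com/Quirxx2/Homework | Task 4.1.py | swapsymbols
-- ===== SOURCE A (Python) =====
-- def swapsymbols(s):
--     l = list()
--     for i in s:
--         if i == "\'":
--             l.append("\"")
--             continue
--         elif i == '"':
--             l.append('\'')
--             continue
--         l.append(i)
--     str1 = ''.join(l)
--     return str1
-- ===== SOURCE B (Python) =====
-- def swapsymbols(s):
--     # Segment-based staged passes: cut the string at every double quote,
--     # turn the single quotes inside each segment into double quotes,
--     # then stitch the segments back together with single quotes.
--     return "'".join(part.replace("'", '"') for part in s.split('"'))
-- ===== Notes on version B (the rewrite author's own statement) =====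
-- stated objective: alternative
-- what changed: Replaces the per-character if/elif loop with a segment-based split/replace/join pipeline: split the string on double quotes, replace single quotes inside each segment, and rejoin with single quotes.
import Mathlib
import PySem

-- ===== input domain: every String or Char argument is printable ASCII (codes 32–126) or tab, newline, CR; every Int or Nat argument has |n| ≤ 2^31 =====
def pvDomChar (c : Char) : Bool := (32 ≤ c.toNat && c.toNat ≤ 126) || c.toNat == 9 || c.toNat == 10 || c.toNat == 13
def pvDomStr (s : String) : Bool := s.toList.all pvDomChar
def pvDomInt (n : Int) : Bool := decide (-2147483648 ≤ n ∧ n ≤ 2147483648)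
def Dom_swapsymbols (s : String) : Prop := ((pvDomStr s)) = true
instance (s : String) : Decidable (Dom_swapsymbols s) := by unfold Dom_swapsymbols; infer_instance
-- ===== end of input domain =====

-- B replaces the per-character if/elif loop by a segment pipeline: split on '"', swap "'" inside each segment, rejoin with "'" (alternative decomposition; return value unchanged).


-- ===== PORT A =====
-- literal port: builds the list l by appending per character, branches in A's order, then joins
def swapsymbols (s : String) : String :=
  let l := s.toList.foldl (fun l i =>
    if i = '\'' then l ++ ['"']
    else if i = '"' then l ++ ['\'']
    else l ++ [i]) []
  String.mk l

-- ===== PORT B =====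
-- "'".join(part.replace("'", '"') for part in s.split('"')) — split on '"' (sep ≠ ""), replace inside each part, join with "'"
def swapsymbols_alt (s : String) : String :=
  String.mk (PySem.Chars.join ['\'']
    ((PySem.Chars.splitOn s.toList ['"']).map (fun p => PySem.Chars.replace p ['\''] ['"'])))

-- ===== PRECONDITION & SPEC =====
def Spec_swapsymbols (s : String) (out : String) : Prop := out = swapsymbols_alt s
instance (s : String) (out : String) : Decidable (Spec_swapsymbols s out) := by unfold Spec_swapsymbols; infer_instance

-- ===== CLAIM (what is proved, stated in full; the proofs are below) =====
def Claim_equal_swapsymbols : Prop := ∀ (s : String), Dom_swapsymbols s → Spec_swapsymbols s (swapsymbols s)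

-- ===== LEMMAS AND PROOFS =====

-- the character maps: what replace does inside a part, and the overall swap
def pvRepl (c : Char) : Char := if c = '\'' then '"' else c
def pvSwap (c : Char) : Char := if c = '\'' then '"' else if c = '"' then '\'' else c

-- prepend a prefix onto the first element of a list of segments
def pvConsHead (p : List Char) : List (List Char) → List (List Char)
  | [] => [p]
  | x :: xs => (p ++ x) :: xs

-- reference single-char split on '"'
def pvSplit1 : List Char → List (List Char)
  | [] => [[]]
  | c :: t => if c = '"' then [] :: pvSplit1 t else pvConsHead [c] (pvSplit1 t)

lemma pvSplit1_ne_nil (l : List Char) : pvSplit1 l ≠ [] := by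
  cases l with
  | nil => simp [pvSplit1]
  | cons c t =>
    simp only [pvSplit1]
    split_ifs
    · simp
    · cases h : pvSplit1 t <;> simp [pvConsHead]

lemma pvConsHead_nil (xs : List (List Char)) (h : xs ≠ []) : pvConsHead [] xs = xs := by
  cases xs with
  | nil => exact absurd rfl h
  | cons x xs => simp [pvConsHead]

lemma pvConsHead_append (a b : List Char) (xs : List (List Char)) :
    pvConsHead (a ++ b) xs = pvConsHead a (pvConsHead b xs) := by
  cases xs <;> simp [pvConsHead]

lemma replace_go_single (l : List Char) (fuel : Nat) (acc : List Char)
    (h : l.length ≤ fuel) :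
    PySem.Chars.replace.go ['\''] ['"'] fuel l acc = acc.reverse ++ l.map pvRepl := by
  induction l generalizing fuel acc with
  | nil => cases fuel <;> simp [PySem.Chars.replace.go]
  | cons c t ih =>
    cases fuel with
    | zero => simp at h
    | succ n =>
      have hn : t.length ≤ n := by simpa using h
      by_cases hc : c = '\''
      · subst hc
        simp [PySem.Chars.replace.go, List.isPrefixOf, ih _ _ hn, pvRepl]
      · have : (['\''].isPrefixOf (c :: t)) = false := by
          simp [List.isPrefixOf, Ne.symm hc]
        simp [PySem.Chars.replace.go, this, ih _ _ hn, pvRepl, hc]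

lemma replace_single (l : List Char) :
    PySem.Chars.replace l ['\''] ['"'] = l.map pvRepl := by
  simpa using replace_go_single l l.length [] (le_refl _)

lemma splitOn_go_single (l : List Char) (fuel : Nat) (cur : List Char)
    (acc : List (List Char)) (h : l.length ≤ fuel) :
    PySem.Chars.splitOn.go ['"'] fuel l cur acc
      = acc.reverse ++ pvConsHead cur.reverse (pvSplit1 l) := by
  induction l generalizing fuel cur acc with
  | nil => cases fuel <;> simp [PySem.Chars.splitOn.go, pvSplit1, pvConsHead]
  | cons c t ih =>
    cases fuel with
    | zero => simp at h
    | succ n =>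
      have hn : t.length ≤ n := by simpa using h
      by_cases hc : c = '"'
      · subst hc
        rw [show PySem.Chars.splitOn.go ['"'] (n+1) ('"'::t) cur acc
              = PySem.Chars.splitOn.go ['"'] n t [] (cur.reverse :: acc) from by
            simp [PySem.Chars.splitOn.go, List.isPrefixOf]]
        rw [ih _ _ _ hn]
        simp only [List.reverse_nil, pvConsHead_nil _ (pvSplit1_ne_nil t)]
        simp [pvSplit1, pvConsHead]
      · have : (['"'].isPrefixOf (c :: t)) = false := by
          simp [List.isPrefixOf, Ne.symm hc]
        have hch : pvConsHead (cur.reverse ++ [c]) (pvSplit1 t)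
            = pvConsHead cur.reverse (pvConsHead [c] (pvSplit1 t)) :=
          pvConsHead_append _ _ _
        simp [PySem.Chars.splitOn.go, this, ih _ _ _ hn, pvSplit1, hc, hch]

lemma splitOn_single (l : List Char) :
    PySem.Chars.splitOn l ['"'] = pvSplit1 l := by
  have h := splitOn_go_single l (l.length + 1) [] [] (by omega)
  simpa [PySem.Chars.splitOn, pvConsHead_nil _ (pvSplit1_ne_nil l)] using h

lemma join_cons_char (sep : List Char) (a : Char) (x : List Char)
    (xs : List (List Char)) :
    PySem.Chars.join sep ((a :: x) :: xs) = a :: PySem.Chars.join sep (x :: xs) := by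
  cases xs with
  | nil => simp [PySem.Chars.join_singleton]
  | cons y ys => simp [PySem.Chars.join_cons_cons]

lemma join_split1 (l : List Char) :
    PySem.Chars.join ['\''] ((pvSplit1 l).map (List.map pvRepl)) = l.map pvSwap := by
  induction l with
  | nil => simp [pvSplit1, PySem.Chars.join_singleton]
  | cons c t ih =>
    by_cases hc : c = '"'
    · subst hc
      obtain ⟨m, ms, hm⟩ : ∃ m ms, (pvSplit1 t).map (List.map pvRepl) = m :: ms := by
        cases h : pvSplit1 t with
        | nil => exact absurd h (pvSplit1_ne_nil t)
        | cons x xs => exact ⟨_, _, rfl⟩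
      have hsp : pvSplit1 ('"' :: t) = [] :: pvSplit1 t := by simp [pvSplit1]
      rw [hsp, List.map_cons, hm, PySem.Chars.join_cons_cons, ← hm, ih]
      simp [pvSwap]
    · obtain ⟨p, ps, hp⟩ : ∃ p ps, pvSplit1 t = p :: ps := by
        cases h : pvSplit1 t with
        | nil => exact absurd h (pvSplit1_ne_nil t)
        | cons x xs => exact ⟨_, _, rfl⟩
      simp only [pvSplit1, if_neg hc, hp, pvConsHead, List.singleton_append,
        List.map_cons, join_cons_char]
      rw [← List.map_cons, ← hp, ih]
      by_cases h2 : c = '\'' <;> simp [pvRepl, pvSwap, hc, h2]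

lemma swap_foldl_eq_map (l acc : List Char) :
    l.foldl (fun l i =>
      if i = '\'' then l ++ ['"']
      else if i = '"' then l ++ ['\'']
      else l ++ [i]) acc
    = acc ++ l.map pvSwap := by
  induction l generalizing acc with
  | nil => simp
  | cons c t ih =>
    simp only [List.foldl_cons, List.map_cons, ih, pvSwap]
    split_ifs <;> simp

-- ===== VERDICT (by name: the statement is the Claim_ definition above) =====
theorem swapsymbols_spec : Claim_equal_swapsymbols := by
  intro s _
  unfold Spec_swapsymbols swapsymbols swapsymbols_alt
  rw [splitOn_single]
  simp only [swap_foldl_eq_map, List.nil_append]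
  congr 1
  rw [show ((pvSplit1 s.toList).map fun p => PySem.Chars.replace p ['\''] ['"'])
        = (pvSplit1 s.toList).map (List.map pvRepl) from
      List.map_congr_left (fun p _ => replace_single p)]
  exact (join_split1 s.toList).symm
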